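-- pv_equiv track=rewrite | github.com/ZKDev01/compilation | cp1/cp1_utils.py | find_parentheses_index
-- ===== SOURCE A (Python) =====
-- def find_parentheses_index(tokens: list):
--   first_close = -1
--   last_open = -1
--   for i in range(0, len(tokens)):
--     if tokens[i] == '(':
--       last_open = i
--     if tokens[i] == ')':
--       first_close = i
--       break
--   return (last_open != -1 and first_close != -1), last_open, first_close
-- ===== SOURCE B (Python) =====
-- def find_parentheses_index(tokens: list):
--     try:
--         first_close = tokens.index(')')
--     except ValueError:
--         first_close = -1
--     region = tokens[:first_close] if first_close != -1 else tokens
--     last_open = -1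
--     for i, t in enumerate(region):
--         if t == '(':
--             last_open = i
--     return (last_open != -1 and first_close != -1), last_open, first_close
-- ===== Notes on version B (the rewrite author's own statement) =====
-- stated objective: alternative
-- what changed: Replaces A's single fused scan-with-early-break by a locate-then-scan decomposition: first find the index of the first ')' via list.index, then take the prefix before it (or the whole list) and record the last '(' in that region with an enumerate fold.
import Mathlib
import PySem

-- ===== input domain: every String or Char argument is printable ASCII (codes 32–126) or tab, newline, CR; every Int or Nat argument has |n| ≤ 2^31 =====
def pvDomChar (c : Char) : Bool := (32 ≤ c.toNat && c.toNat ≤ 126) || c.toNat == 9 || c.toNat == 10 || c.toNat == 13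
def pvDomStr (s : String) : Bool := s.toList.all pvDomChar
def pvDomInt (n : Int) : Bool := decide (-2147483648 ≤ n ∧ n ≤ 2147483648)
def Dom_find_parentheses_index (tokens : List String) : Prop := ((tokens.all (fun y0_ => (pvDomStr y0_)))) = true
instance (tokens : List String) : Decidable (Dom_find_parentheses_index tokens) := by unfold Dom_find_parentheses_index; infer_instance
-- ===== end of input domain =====

-- B: locate-then-scan decomposition (list.index for the first ')', then a last-'(' scan of the prefix) instead of A's fused early-break loop; same O(n) cost, return value proved equal.
-- ===== PORT A =====
-- A's for-loop with break, as structural recursion over the list carrying the running index and last_open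
def pvAuxA : List String → Int → Int → Int × Int
  | [], _, lastOpen => (lastOpen, -1)
  | t :: ts, i, lastOpen =>
    let lastOpen' := if t == "(" then i else lastOpen
    if t == ")" then (lastOpen', i) else pvAuxA ts (i + 1) lastOpen'

def find_parentheses_index (tokens : List String) : Bool × Int × Int :=
  let r := pvAuxA tokens 0 (-1)
  ((r.1 != -1) && (r.2 != -1), r.1, r.2)

-- ===== PORT B =====
def find_parentheses_index_alt (tokens : List String) : Bool × Int × Int :=
  let firstClose : Int :=
    match PySem.List.index? tokens ")" with
    | some n => (n : Int)
    | none => -1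
  let region := if firstClose != -1 then PySem.List.slice tokens none (some firstClose) else tokens
  let lastOpen : Int :=
    (PySem.List.enumerate region 0).foldl (fun acc p => if p.2 == "(" then p.1 else acc) (-1)
  ((lastOpen != -1) && (firstClose != -1), lastOpen, firstClose)

-- ===== PRECONDITION & SPEC =====
def Spec_find_parentheses_index (tokens : List String) (out : Bool × Int × Int) : Prop := out = find_parentheses_index_alt tokens
instance (tokens : List String) (out : Bool × Int × Int) : Decidable (Spec_find_parentheses_index tokens out) := by unfold Spec_find_parentheses_index; infer_instance

-- ===== CLAIM (what is proved, stated in full; the proofs are below) =====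
def Claim_equal_find_parentheses_index : Prop := ∀ (tokens : List String), Dom_find_parentheses_index tokens → Spec_find_parentheses_index tokens (find_parentheses_index tokens)

-- ===== LEMMAS AND PROOFS =====

-- ===== VERDICT (by name: the statement is the Claim_ definition above) =====
-- loop fold function of B
lemma pvAuxA_spec (ts : List String) (i lo : Int) :
    pvAuxA ts i lo =
      match PySem.List.index? ts ")" with
      | some n => ((PySem.List.enumerate (ts.take n) i).foldl
          (fun acc p => if p.2 == "(" then p.1 else acc) lo, i + (n : Int))
      | none => ((PySem.List.enumerate ts i).foldl
          (fun acc p => if p.2 == "(" then p.1 else acc) lo, -1) := by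
  induction ts generalizing i lo with
  | nil => simp [pvAuxA, PySem.List.index?, PySem.List.enumerate_nil]
  | cons t ts ih =>
    by_cases ht : t = ")"
    · subst ht
      rw [PySem.List.index?_cons_self]
      simp [pvAuxA]
    · rw [PySem.List.index?_cons_of_ne ts ht]
      have hne : (t == ")") = false := by simpa using ht
      cases hidx : PySem.List.index? ts ")" with
      | some n =>
        simp only [Option.map_some]
        have h := ih (i + 1) (if t == "(" then i else lo)
        rw [hidx] at h
        dsimp only at h
        simp only [pvAuxA, hne, Bool.false_eq_true, if_false, List.take_succ_cons,
          PySem.List.enumerate_cons, List.foldl_cons, h, Prod.mk.injEq]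
        exact ⟨trivial, by push_cast; ring⟩
      | none =>
        simp only [Option.map_none]
        have h := ih (i + 1) (if t == "(" then i else lo)
        rw [hidx] at h
        dsimp only at h
        simp only [pvAuxA, hne, Bool.false_eq_true, if_false,
          PySem.List.enumerate_cons, List.foldl_cons, h]

theorem find_parentheses_index_spec : Claim_equal_find_parentheses_index := by
  intro tokens _
  unfold Spec_find_parentheses_index find_parentheses_index find_parentheses_index_alt
  rw [pvAuxA_spec]
  cases hidx : PySem.List.index? tokens ")" with
  | some n =>
    have hn : ((n : Int) != -1) = true := by simp
    simp [hn, PySem.List.slice_to_natCast]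
  | none =>
    simp
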